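-- pv_equiv track=rewrite | github.com/birdman74/advent-of-code-2021 | src/day17.py | min_max_x_vel
-- ===== SOURCE A (Python) =====
-- def min_max_x_vel(num_range):
--     range_min = min(num_range)
--     range_max = max(num_range)
--
--     min_vel = None
--
--     steps = 0
--     position = 0
--     while min_vel is None:
--         steps += 1
--         position += steps
--
--         if min_vel is None and position > range_min:
--             min_vel = steps
--
--     return min_vel, range_max
-- ===== SOURCE B (Python) =====
-- def min_max_x_vel(num_range):
--     m = min(num_range)
--     mx = max(num_range)
--     if m <= 0:
--         return 1, mx
--     # exponential search for an upper bound, then binary search for the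
--     # least n with n*(n+1)//2 > m (a different strategy from step-by-step summing)
--     hi = 1
--     while hi * (hi + 1) // 2 <= m:
--         hi *= 2
--     lo = 1
--     while lo < hi:
--         mid = (lo + hi) // 2
--         if mid * (mid + 1) // 2 > m:
--             hi = mid
--         else:
--             lo = mid + 1
--     return lo, mx
-- ===== Notes on version B (the rewrite author's own statement) =====
-- stated objective: alternative
-- what changed: Replaced A's step-by-step triangular-sum accumulation loop with an exponential-then-binary search for the least n with n*(n+1)//2 > min(num_range); the search needs O(log m) probes instead of A's O(sqrt(m)) additions, but total time is dominated by min/max over the list, so no measured speed-up.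
import Mathlib
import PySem

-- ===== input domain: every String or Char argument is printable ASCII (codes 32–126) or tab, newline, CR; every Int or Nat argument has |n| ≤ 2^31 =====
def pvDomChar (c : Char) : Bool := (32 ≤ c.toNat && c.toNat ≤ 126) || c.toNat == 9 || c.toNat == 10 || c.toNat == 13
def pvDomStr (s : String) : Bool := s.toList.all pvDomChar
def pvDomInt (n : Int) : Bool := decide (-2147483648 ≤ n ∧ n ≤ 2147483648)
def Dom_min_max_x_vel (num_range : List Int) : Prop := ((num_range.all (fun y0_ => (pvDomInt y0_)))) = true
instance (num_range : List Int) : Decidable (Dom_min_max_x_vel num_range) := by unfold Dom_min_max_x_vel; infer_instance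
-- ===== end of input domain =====

-- B replaces A's step-by-step triangular accumulation with an exponential-then-binary
-- search for the least n with n*(n+1)//2 > min(num_range) (alternative algorithm).

-- ===== PORT A =====
-- A's while loop: steps counts iterations (0,1,2,... hence Nat), position the running sum.
def loopA (m : Int) (steps : Nat) (position : Int) : Int :=
  if position + ((steps + 1 : Nat) : Int) > m then ((steps + 1 : Nat) : Int)
  else loopA m (steps + 1) (position + ((steps + 1 : Nat) : Int))
termination_by (m - position).toNat
decreasing_by
  simp only [not_lt] at *
  omega

def min_max_x_vel (num_range : List Int) : List Int :=
  match PySem.List.min? num_range (fun x => x), PySem.List.max? num_range (fun x => x) with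
  | some mn, some mx => [loopA mn 0 0, mx]
  | _, _ => []   -- Python raises ValueError on an empty list; excluded by Pre_

-- ===== PORT B =====
-- 1 ≤ x → x ≤ x*(x+1)/2 : used by growHi's termination proof (cited in decreasing_by)
theorem pv_le_tri (x : Nat) (h : 1 ≤ x) : x ≤ x * (x + 1) / 2 := by
  rw [Nat.le_div_iff_mul_le (by norm_num)]
  nlinarith

-- `hi` stays ≥ 1 in Source B, so Nat is exact; hi*(hi+1)//2 on nonneg values is Nat division
-- (exact). The `hi = 0` guard only makes the recursion total and is never reached from the call.
def growHi (m : Int) (hi : Nat) : Nat :=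
  if _h0 : hi = 0 then 0
  else if ((hi * (hi + 1) / 2 : Nat) : Int) ≤ m then growHi m (2 * hi) else hi
termination_by (m + 1 - (hi : Int)).toNat
decreasing_by
  rename_i h1
  have := pv_le_tri hi (by omega)
  have : ((hi : Int)) ≤ m := le_trans (by exact_mod_cast this) h1
  omega

def bsearch (m : Int) (lo hi : Nat) : Nat :=
  if lo < hi then
    let mid := (lo + hi) / 2
    if ((mid * (mid + 1) / 2 : Nat) : Int) > m then bsearch m lo mid
    else bsearch m (mid + 1) hi
  else lo
termination_by hi - lo
decreasing_by all_goals omega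

def min_max_x_vel_alt (num_range : List Int) : List Int :=
  match PySem.List.min? num_range (fun x => x) with
  | none => []   -- Python raises ValueError on an empty list; excluded by Pre_
  | some m =>
    match PySem.List.max? num_range (fun x => x) with
    | none => []
    | some mx =>
      if m ≤ 0 then [1, mx]
      else [(bsearch m 1 (growHi m 1) : Int), mx]

-- ===== PRECONDITION & SPEC =====
-- Python's min()/max() raise ValueError on an empty list; that is the only exclusion.
def Pre_min_max_x_vel (num_range : List Int) : Prop := num_range ≠ []
instance (num_range : List Int) : Decidable (Pre_min_max_x_vel num_range) := by
  unfold Pre_min_max_x_vel; infer_instance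

def pvWitness_min_max_x_vel : List Int := [5, 20]

def Spec_min_max_x_vel (num_range : List Int) (out : List Int) : Prop := out = min_max_x_vel_alt num_range
instance (num_range : List Int) (out : List Int) : Decidable (Spec_min_max_x_vel num_range out) := by unfold Spec_min_max_x_vel; infer_instance

-- ===== CLAIM (what is proved, stated in full; the proofs are below) =====
def Claim_equal_min_max_x_vel : Prop := ∀ (num_range : List Int), Dom_min_max_x_vel num_range → Pre_min_max_x_vel num_range → Spec_min_max_x_vel num_range (min_max_x_vel num_range)

-- ===== LEMMAS AND PROOFS =====

-- triangular numbers, recursively (matches A's accumulation step)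
def tri : Nat → Nat
  | 0 => 0
  | n + 1 => tri n + (n + 1)

theorem two_mul_tri (n : Nat) : 2 * tri n = n * (n + 1) := by
  induction n with
  | zero => simp [tri]
  | succ k ih => simp [tri]; ring_nf; ring_nf at ih; omega

theorem tri_closed (n : Nat) : n * (n + 1) / 2 = tri n := by
  have := two_mul_tri n; omega

theorem tri_mono {a b : Nat} (h : a ≤ b) : tri a ≤ tri b := by
  rw [← tri_closed, ← tri_closed]
  exact Nat.div_le_div_right (Nat.mul_le_mul h (by omega))

-- growHi returns a bound hi' ≥ hi with tri hi' > m (for hi ≥ 1)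
theorem growHi_spec (m : Int) (hi : Nat) (h1 : 1 ≤ hi) :
    hi ≤ growHi m hi ∧ m < ((tri (growHi m hi) : Nat) : Int) := by
  fun_induction growHi m hi with
  | case1 => omega
  | case2 hi h0 hle ih =>
      obtain ⟨ih1, ih2⟩ := ih (by omega)
      exact ⟨by omega, ih2⟩
  | case3 hi h0 hgt =>
      rw [tri_closed] at hgt
      exact ⟨le_refl _, by omega⟩

-- bsearch keeps the invariant (tri (lo-1) ≤ m < tri hi) and returns the least n with tri n > m
theorem bsearch_spec (m : Int) (lo hi : Nat)
    (h1 : 1 ≤ lo) (hlh : lo ≤ hi)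
    (hlo : ((tri (lo - 1) : Nat) : Int) ≤ m) (hhi : m < ((tri hi : Nat) : Int)) :
    1 ≤ bsearch m lo hi ∧ ((tri (bsearch m lo hi - 1) : Nat) : Int) ≤ m ∧
      m < ((tri (bsearch m lo hi) : Nat) : Int) := by
  fun_induction bsearch m lo hi with
  | case1 lo hi hlt mid hgt ih =>
      rw [tri_closed] at hgt
      exact ih h1 (by omega) hlo hgt
  | case2 lo hi hlt mid hle ih =>
      rw [tri_closed] at hle
      simp only [not_lt] at hle
      exact ih (by omega) (by omega) (by simpa using hle) hhi
  | case3 lo hi hge =>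
      have : lo = hi := by omega
      subst this
      exact ⟨h1, hlo, hhi⟩

-- A's loop, started at step n with position tri n, lands exactly on the least r with tri r > m
theorem loopA_eq (m : Int) (r : Nat) (hr1 : 1 ≤ r)
    (hrm : m < ((tri r : Nat) : Int)) (hrm' : ((tri (r - 1) : Nat) : Int) ≤ m) :
    ∀ n, n < r → ((tri n : Nat) : Int) ≤ m → loopA m n ((tri n : Nat) : Int) = (r : Int) := by
  intro n
  induction hk : r - n generalizing n with
  | zero => omega
  | succ k ih =>
      intro hnr hnm
      rw [loopA]
      have hstep : ((tri n : Nat) : Int) + ((n + 1 : Nat) : Int) = ((tri (n + 1) : Nat) : Int) := by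
        simp only [tri]; push_cast; ring
      by_cases hc : ((tri n : Nat) : Int) + ((n + 1 : Nat) : Int) > m
      · rw [if_pos (by exact_mod_cast hc)]
        -- tri (r-1) ≤ m < tri (n+1) forces r - 1 < n + 1, so r = n + 1
        have : r - 1 < n + 1 := by
          by_contra hcon
          have := tri_mono (Nat.le_of_not_lt hcon)
          rw [hstep] at hc
          have : ((tri (n+1) : Nat) : Int) ≤ ((tri (r-1) : Nat) : Int) := by exact_mod_cast this
          omega
        have : r = n + 1 := by omega
        subst this; push_cast; ring
      · rw [if_neg (by exact_mod_cast hc)]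
        rw [hstep] at hc ⊢
        -- tri (n+1) ≤ m < tri r forces n + 1 < r
        have hlt : n + 1 < r := by
          rcases Nat.lt_or_ge (n + 1) r with h | h
          · exact h
          · have : r = n + 1 := by omega
            subst this; omega
        exact ih (n + 1) (by omega) hlt (by omega)

theorem main_eq (m : Int) : loopA m 0 0 =
    (if m ≤ 0 then (1 : Int) else (bsearch m 1 (growHi m 1) : Int)) := by
  by_cases hm : m ≤ 0
  · rw [if_pos hm, loopA]
    simp; omega
  · rw [if_neg hm]
    obtain ⟨hg1, hg2⟩ := growHi_spec m 1 (le_refl 1)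
    obtain ⟨hb1, hb2, hb3⟩ := bsearch_spec m 1 (growHi m 1) (le_refl 1) hg1
      (by simp [tri]; omega) hg2
    have hlt : 0 < bsearch m 1 (growHi m 1) := hb1
    have := loopA_eq m (bsearch m 1 (growHi m 1)) hb1 hb3 hb2 0 hlt
      (by simp [tri]; omega)
    simpa [tri] using this

-- ===== VERDICT (by name: the statement is the Claim_ definition above) =====
theorem min_max_x_vel_spec : Claim_equal_min_max_x_vel := by
  intro num_range _hdom _hpre
  unfold Spec_min_max_x_vel min_max_x_vel min_max_x_vel_alt
  cases hmn : PySem.List.min? num_range (fun x => x) with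
  | none => cases hmx : PySem.List.max? num_range (fun x => x) <;> simp
  | some mn =>
      cases hmx : PySem.List.max? num_range (fun x => x) with
      | none => simp
      | some mx =>
          simp only [main_eq]
          split <;> rfl
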